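-- pv_equiv track=rewrite | github.com/asSqr/CDSViewer | discrepancy.py | revDigit
-- ===== SOURCE A (Python) =====
-- def revDigit( x, b, length, per = [] ):
--   xs = []
--
--   for i in range(length):
--     if i < len(per):
--       xs.append( per[i][x%b] )
--     else:
--       xs.append( x%b )
--
--     x = x // b
--
--   p = 0
--
--   for x in xs:
--     p *= b
--     p += x
--
--   return p
-- ===== SOURCE B (Python) =====
-- def revDigit(x, b, length, per=[]):
--     # divide-and-conquer: value of the n reversed digits starting at position i,
--     # threading x (the remaining number) through; recursion depth O(log length)
--     def go(x, i, n):
--         if n == 1: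
--             r = x % b
--             d = per[i][r] if i < len(per) else r
--             return d, x // b
--         k = n // 2
--         hi, x = go(x, i, k)
--         lo, x = go(x, i + k, n - k)
--         return hi * b ** (n - k) + lo, x
--     if length <= 0:
--         return 0
--     return go(x, 0, length)[0]
-- ===== Notes on version B (the rewrite author's own statement) =====
-- stated objective: alternative
-- what changed: B replaces A's build-a-digit-list-then-Horner-fold by a divide-and-conquer recursion that splits the digit range in half, combines the halves with one shift hi*b**(n-k)+lo, and threads the remaining x through; no intermediate list and recursion depth O(log length).
import Mathlib
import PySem

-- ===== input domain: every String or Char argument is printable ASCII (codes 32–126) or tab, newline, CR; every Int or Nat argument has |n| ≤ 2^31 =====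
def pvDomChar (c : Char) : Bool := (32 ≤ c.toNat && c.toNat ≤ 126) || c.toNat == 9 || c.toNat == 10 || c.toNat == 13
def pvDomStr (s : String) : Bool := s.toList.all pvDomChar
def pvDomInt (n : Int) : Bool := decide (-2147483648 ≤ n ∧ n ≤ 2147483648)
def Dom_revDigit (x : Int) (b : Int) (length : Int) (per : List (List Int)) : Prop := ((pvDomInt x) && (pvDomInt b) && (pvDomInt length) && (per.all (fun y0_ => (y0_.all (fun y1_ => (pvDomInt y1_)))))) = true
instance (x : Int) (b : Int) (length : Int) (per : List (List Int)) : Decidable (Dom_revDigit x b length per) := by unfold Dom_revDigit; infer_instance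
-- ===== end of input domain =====

-- B replaces A's build-a-digit-list-then-Horner second loop by a divide-and-conquer
-- recursion on the digit range (split in half, combine with one shift hi*b^(n-k)+lo,
-- thread the remaining x through); no intermediate list. Alternative decomposition.


-- ===== PORT A =====
-- A: first loop builds the list xs of (possibly permuted) base-b digits of x,
-- then a second loop Horner-folds xs into p.
def revDigit (x : Int) (b : Int) (length : Int) (per : List (List Int)) : Int :=
  let s := (List.range length.toNat).foldl
    (fun (s : List Int × Int) i =>
      let d := if i < per.length then
          PySem.List.pyGetD (per.getD i []) (PySem.Int.mod s.2 b) 0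
        else PySem.Int.mod s.2 b
      (s.1 ++ [d], PySem.Int.floordiv s.2 b))
    ([], x)
  s.1.foldl (fun p d => p * b + d) 0

-- ===== PORT B =====
-- B's helper go(x, i, n): divide and conquer on the digit range; returns the
-- reversed-weighted value of the n digits starting at position i, and the
-- remaining x after n divisions. The n = 0 branch only makes the Lean
-- function total (the Python never calls go with n = 0).
def revGo (b : Int) (per : List (List Int)) (x : Int) (i : Nat) (n : Nat) : Int × Int :=
  if n = 0 then (0, x)
  else if n = 1 then
    let r := PySem.Int.mod x b
    let d := if i < per.length then PySem.List.pyGetD (per.getD i []) r 0 else r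
    (d, PySem.Int.floordiv x b)
  else
    let k := n / 2
    let h := revGo b per x i k
    let l := revGo b per h.2 (i + k) (n - k)
    (h.1 * b ^ (n - k) + l.1, l.2)
termination_by n
decreasing_by all_goals omega

def revDigit_alt (x : Int) (b : Int) (length : Int) (per : List (List Int)) : Int :=
  if length ≤ 0 then 0 else (revGo b per x 0 length.toNat).1

-- ===== PRECONDITION & SPEC =====
-- the value of x after i floor divisions by b (the i-th loop state of either Python)
def pvX_revDigit (x b : Int) : Nat → Int
  | 0 => x
  | n + 1 => PySem.Int.floordiv (pvX_revDigit x b n) b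

-- Pre_ excludes exactly the inputs on which the Python A raises: b = 0 with a positive
-- length (ZeroDivisionError from x % b), and an out-of-range per[i][x % b] (IndexError).
def Pre_revDigit (x : Int) (b : Int) (length : Int) (per : List (List Int)) : Prop :=
  length ≤ 0 ∨ (b ≠ 0 ∧ ∀ i : Nat, i < min length.toNat per.length →
    PySem.Raise.InRange (per.getD i []).length (PySem.Int.mod (pvX_revDigit x b i) b))
instance (x : Int) (b : Int) (length : Int) (per : List (List Int)) : Decidable (Pre_revDigit x b length per) := by unfold Pre_revDigit; infer_instance

def pvWitness_revDigit : Int × Int × Int × List (List Int) := (13, 2, 4, [[0, 1], [1, 0]])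

def Spec_revDigit (x : Int) (b : Int) (length : Int) (per : List (List Int)) (out : Int) : Prop := out = revDigit_alt x b length per
instance (x : Int) (b : Int) (length : Int) (per : List (List Int)) (out : Int) : Decidable (Spec_revDigit x b length per out) := by unfold Spec_revDigit; infer_instance

-- ===== CLAIM (what is proved, stated in full; the proofs are below) =====
def Claim_equal_revDigit : Prop := ∀ (x : Int) (b : Int) (length : Int) (per : List (List Int)), Dom_revDigit x b length per → Pre_revDigit x b length per → Spec_revDigit x b length per (revDigit x b length per)

-- ===== LEMMAS AND PROOFS =====

-- the digit taken at absolute position i + j when j divisions have already happened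
def pvE_revDigit (b : Int) (per : List (List Int)) (x : Int) (i j : Nat) : Int :=
  if i + j < per.length then
    PySem.List.pyGetD (per.getD (i + j) []) (PySem.Int.mod (pvX_revDigit x b j) b) 0
  else PySem.Int.mod (pvX_revDigit x b j) b

theorem pvX_add (x b : Int) (k j : Nat) :
    pvX_revDigit (pvX_revDigit x b k) b j = pvX_revDigit x b (k + j) := by
  induction j with
  | zero => rfl
  | succ j ih => simp [pvX_revDigit, ih]

theorem pv_aloop (x b : Int) (per : List (List Int)) (k : Nat) (l : List Int) :
    (List.range k).foldl
      (fun (s : List Int × Int) i =>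
        let d := if i < per.length then
            PySem.List.pyGetD (per.getD i []) (PySem.Int.mod s.2 b) 0
          else PySem.Int.mod s.2 b
        (s.1 ++ [d], PySem.Int.floordiv s.2 b))
      (l, x)
    = (l ++ (List.range k).map (pvE_revDigit b per x 0), pvX_revDigit x b k) := by
  induction k generalizing l with
  | zero => simp [pvX_revDigit]
  | succ k ih =>
      rw [List.range_succ, List.foldl_append, ih, List.map_append]
      simp [pvE_revDigit, pvX_revDigit]

theorem pv_horner (b : Int) (D : Nat → Int) (k : Nat) :
    ((List.range k).map D).foldl (fun p d => p * b + d) 0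
      = ∑ i ∈ Finset.range k, D i * b ^ (k - 1 - i) := by
  induction k with
  | zero => simp
  | succ k ih =>
      rw [List.range_succ, List.map_append, List.foldl_append, ih, Finset.sum_range_succ]
      show (∑ i ∈ Finset.range k, D i * b ^ (k - 1 - i)) * b + D k = _
      have h1 : ∀ i ∈ Finset.range k, D i * b ^ (k + 1 - 1 - i) = D i * b ^ (k - 1 - i) * b := by
        intro i hi
        rw [Finset.mem_range] at hi
        have h2 : k + 1 - 1 - i = (k - 1 - i) + 1 := by omega
        rw [h2, pow_succ]; ring
      rw [Finset.sum_congr rfl h1, ← Finset.sum_mul]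
      have h3 : k + 1 - 1 - k = 0 := by omega
      rw [h3, pow_zero, mul_one]

-- characterisation of B's divide-and-conquer helper
theorem pv_go (b : Int) (per : List (List Int)) :
    ∀ n x i, 0 < n →
    revGo b per x i n
      = (∑ j ∈ Finset.range n, pvE_revDigit b per x i j * b ^ (n - 1 - j),
         pvX_revDigit x b n) := by
  intro n
  induction n using Nat.strong_induction_on with
  | _ n ih =>
    intro x i hn
    rw [revGo]
    by_cases h1 : n = 1
    · subst h1
      simp [pvE_revDigit, pvX_revDigit]
    · have h2 : ¬ n = 0 := by omega
      have hk1 : 0 < n / 2 := by omega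
      have hk2 : 0 < n - n / 2 := by omega
      simp only [h2, h1, if_false]
      rw [ih (n / 2) (by omega) x i hk1,
          ih (n - n / 2) (by omega) (pvX_revDigit x b (n / 2)) (i + n / 2) hk2]
      have hsplit : n = n / 2 + (n - n / 2) := by omega
      refine Prod.ext ?_ ?_
      · show (∑ j ∈ Finset.range (n / 2), pvE_revDigit b per x i j * b ^ (n / 2 - 1 - j))
              * b ^ (n - n / 2)
            + ∑ j ∈ Finset.range (n - n / 2),
                pvE_revDigit b per (pvX_revDigit x b (n / 2)) (i + n / 2) j
                  * b ^ (n - n / 2 - 1 - j)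
          = ∑ j ∈ Finset.range n, pvE_revDigit b per x i j * b ^ (n - 1 - j)
        conv_rhs => rw [hsplit, Finset.sum_range_add]
        congr 1
        · rw [Finset.sum_mul]
          refine Finset.sum_congr rfl ?_
          intro j hj
          rw [Finset.mem_range] at hj
          have : n / 2 + (n - n / 2) - 1 - j = (n / 2 - 1 - j) + (n - n / 2) := by omega
          rw [this, pow_add]; ring
        · refine Finset.sum_congr rfl ?_
          intro j hj
          rw [Finset.mem_range] at hj
          have he : pvE_revDigit b per (pvX_revDigit x b (n / 2)) (i + n / 2) j
              = pvE_revDigit b per x i (n / 2 + j) := by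
            unfold pvE_revDigit
            rw [pvX_add]
            have : i + n / 2 + j = i + (n / 2 + j) := by omega
            rw [this]
          rw [he]
          congr 2
          omega
      · show pvX_revDigit (pvX_revDigit x b (n / 2)) b (n - n / 2) = pvX_revDigit x b n
        rw [pvX_add]
        congr 1
        omega

theorem pv_AB (x b : Int) (length : Int) (per : List (List Int)) :
    revDigit x b length per = revDigit_alt x b length per := by
  rcases le_or_gt length 0 with hle | hpos
  · have : length.toNat = 0 := by omega
    simp [revDigit, revDigit_alt, this, hle]
  · have hn : 0 < length.toNat := by omega
    rw [revDigit, revDigit_alt, if_neg (by omega)]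
    simp only [pv_aloop x b per length.toNat [], List.nil_append,
      pv_go b per length.toNat x 0 hn]
    exact pv_horner b (pvE_revDigit b per x 0) length.toNat

-- ===== VERDICT (by name: the statement is the Claim_ definition above) =====
theorem revDigit_spec : Claim_equal_revDigit := by
  intro x b length per _ _
  exact pv_AB x b length per
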